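-- pv_equiv track=rewrite | github.com/cbastian1212/Advent_of_Code_2023 | day11/day11.py | recalculate_galaxies_coordinates
-- ===== SOURCE A (Python) =====
-- def recalculate_galaxies_coordinates(
--     galaxies: list, empty_rows, empty_cols, factor
-- ) -> list:
--     """
--     Recalculates galaxies coordinates based on empty rows and columns
--     in the universe map and the expansion factor
--     """
--     new_galaxies = []
--
--     for galaxy in galaxies:
--         row_offset = sum(1 for row in empty_rows if row < galaxy[0])
--         col_offset = sum(1 for col in empty_cols if col < galaxy[1])
--
--         new_galaxy = (
--             galaxy[0] - row_offset + row_offset * factor,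
--             galaxy[1] - col_offset + col_offset * factor,
--         )
--         new_galaxies.append(new_galaxy)
--
--     return new_galaxies
-- ===== SOURCE B (Python) =====
-- def _count_less(a, x):
--     # number of elements of sorted list a that are < x (bisect_left)
--     lo, hi = 0, len(a)
--     while lo < hi:
--         mid = (lo + hi) // 2
--         if a[mid] < x:
--             lo = mid + 1
--         else:
--             hi = mid
--     return lo
--
--
-- def recalculate_galaxies_coordinates(galaxies, empty_rows, empty_cols, factor):
--     rows = sorted(empty_rows)
--     cols = sorted(empty_cols)
--     scale = factor - 1
--     new_galaxies = []
--     for r, c in galaxies: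
--         new_galaxies.append(
--             (r + _count_less(rows, r) * scale, c + _count_less(cols, c) * scale)
--         )
--     return new_galaxies
-- ===== Notes on version B (the rewrite author's own statement) =====
-- stated objective: faster
-- what changed: Instead of scanning every empty row/column for every galaxy, B sorts the empty rows and columns once and finds each galaxy's offset by binary search (hand-written bisect_left).
import Mathlib
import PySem

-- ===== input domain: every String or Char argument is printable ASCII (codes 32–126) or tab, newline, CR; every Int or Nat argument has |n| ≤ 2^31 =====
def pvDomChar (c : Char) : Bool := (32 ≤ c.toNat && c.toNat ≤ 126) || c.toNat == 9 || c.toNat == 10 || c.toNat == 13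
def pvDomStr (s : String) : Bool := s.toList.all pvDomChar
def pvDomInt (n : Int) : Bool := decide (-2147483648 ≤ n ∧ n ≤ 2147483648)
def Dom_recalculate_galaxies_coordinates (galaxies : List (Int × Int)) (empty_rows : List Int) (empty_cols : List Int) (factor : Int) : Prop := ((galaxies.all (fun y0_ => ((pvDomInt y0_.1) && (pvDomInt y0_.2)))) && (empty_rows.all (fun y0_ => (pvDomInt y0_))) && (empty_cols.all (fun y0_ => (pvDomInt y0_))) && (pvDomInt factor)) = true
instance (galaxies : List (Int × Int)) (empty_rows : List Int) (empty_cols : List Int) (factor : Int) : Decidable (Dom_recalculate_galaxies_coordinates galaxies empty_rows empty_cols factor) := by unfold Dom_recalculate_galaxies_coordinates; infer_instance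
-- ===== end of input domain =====

-- B sorts the empty rows/cols once and binary-searches each galaxy's offset instead of
-- rescanning all empty rows/cols per galaxy (objective: faster, O(G*E) → O((G+E) log E)).

-- ===== PORT A =====
-- per-galaxy scan: sum(1 for row in empty_rows if row < galaxy[0]) = countP
def recalculate_galaxies_coordinates (galaxies : List (Int × Int)) (empty_rows : List Int) (empty_cols : List Int) (factor : Int) : List (Int × Int) :=
  galaxies.foldl (fun new_galaxies galaxy =>
    let row_offset : Int := (empty_rows.countP (fun row => decide (row < galaxy.1)) : Int)
    let col_offset : Int := (empty_cols.countP (fun col => decide (col < galaxy.2)) : Int)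
    new_galaxies ++ [(galaxy.1 - row_offset + row_offset * factor,
                      galaxy.2 - col_offset + col_offset * factor)]) []

-- ===== PORT B =====
-- hand-written bisect_left loop of Source B's _count_less (lo/hi halving)
def countLessGo (a : List Int) (x : Int) (lo hi : Nat) : Nat :=
  if _h : lo < hi then
    let mid := (lo + hi) / 2
    if a.getD mid 0 < x then countLessGo a x (mid + 1) hi
    else countLessGo a x lo mid
  else lo
termination_by hi - lo
decreasing_by all_goals omega

def countLess (a : List Int) (x : Int) : Nat := countLessGo a x 0 a.length

def recalculate_galaxies_coordinates_alt (galaxies : List (Int × Int)) (empty_rows : List Int) (empty_cols : List Int) (factor : Int) : List (Int × Int) :=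
  let rows := PySem.List.sorted empty_rows (fun v => v)
  let cols := PySem.List.sorted empty_cols (fun v => v)
  let scale := factor - 1
  galaxies.foldl (fun new_galaxies g =>
    new_galaxies ++ [(g.1 + (countLess rows g.1 : Int) * scale,
                      g.2 + (countLess cols g.2 : Int) * scale)]) []

-- ===== PRECONDITION & SPEC =====
def Spec_recalculate_galaxies_coordinates (galaxies : List (Int × Int)) (empty_rows : List Int) (empty_cols : List Int) (factor : Int) (out : List (Int × Int)) : Prop := out = recalculate_galaxies_coordinates_alt galaxies empty_rows empty_cols factor
instance (galaxies : List (Int × Int)) (empty_rows : List Int) (empty_cols : List Int) (factor : Int) (out : List (Int × Int)) : Decidable (Spec_recalculate_galaxies_coordinates galaxies empty_rows empty_cols factor out) := by unfold Spec_recalculate_galaxies_coordinates; infer_instance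

-- ===== CLAIM =====
def Claim_equal_recalculate_galaxies_coordinates : Prop := ∀ (galaxies : List (Int × Int)) (empty_rows : List Int) (empty_cols : List Int) (factor : Int), Dom_recalculate_galaxies_coordinates galaxies empty_rows empty_cols factor → Spec_recalculate_galaxies_coordinates galaxies empty_rows empty_cols factor (recalculate_galaxies_coordinates galaxies empty_rows empty_cols factor)

-- ===== LEMMAS AND PROOFS =====

-- countP of a list whose predicate holds exactly on the first k indices is k
lemma countP_eq_of_index (p : Int → Bool) (s : List Int) (k : Nat) (hk : k ≤ s.length)
    (h : ∀ j (hj : j < s.length), p s[j] = decide (j < k)) : s.countP p = k := by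
  induction s generalizing k with
  | nil => simp at hk ⊢; omega
  | cons a t ih =>
    cases k with
    | zero =>
      rw [List.countP_cons]
      have h0 := h 0 (by simp)
      simp at h0
      have : t.countP p = 0 := by
        apply ih 0 (by omega)
        intro j hj
        have := h (j + 1) (by simpa using Nat.succ_lt_succ hj)
        simpa using this
      simp [this, h0]
    | succ k' =>
      rw [List.countP_cons]
      have h0 := h 0 (by simp)
      simp at h0
      have : t.countP p = k' := by
        apply ih k' (by simpa using hk)
        intro j hj
        have := h (j + 1) (by simpa using Nat.succ_lt_succ hj)
        simpa using this
      simp [this, h0]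

lemma countLessGo_spec (a : List Int) (x : Int) (lo hi : Nat)
    (hs : a.Pairwise (· ≤ ·)) (hhi : hi ≤ a.length) (hlh : lo ≤ hi)
    (h1 : ∀ j (hj : j < a.length), j < lo → a[j] < x)
    (h2 : ∀ j (hj : j < a.length), hi ≤ j → ¬ a[j] < x) :
    countLessGo a x lo hi = a.countP (fun r => decide (r < x)) := by
  rw [countLessGo]
  by_cases h : lo < hi
  · simp only [dif_pos h]
    have hmid1 : lo ≤ (lo + hi) / 2 := by omega
    have hmid2 : (lo + hi) / 2 < hi := by omega
    have hmlt : (lo + hi) / 2 < a.length := by omega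
    have hget : a.getD ((lo + hi) / 2) 0 = a[(lo + hi) / 2] := List.getD_eq_getElem a 0 hmlt
    have hmono := List.pairwise_iff_getElem.mp hs
    by_cases hx : a.getD ((lo + hi) / 2) 0 < x
    · simp only [if_pos hx]
      apply countLessGo_spec a x _ hi hs hhi (by omega)
      · intro j hj hjlt
        by_cases hje : j = (lo + hi) / 2
        · subst hje; rwa [hget] at hx
        · by_cases hjlo : j < lo
          · exact h1 j hj hjlo
          · -- lo ≤ j < mid : a[j] ≤ a[mid] < x
            have : a[j] ≤ a[(lo + hi) / 2] := hmono j ((lo + hi) / 2) hj hmlt (by omega)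
            rw [hget] at hx; omega
      · exact h2
    · simp only [if_neg hx]
      apply countLessGo_spec a x lo _ hs (by omega) (by omega) h1
      intro j hj hjge
      by_cases hje : j = (lo + hi) / 2
      · subst hje; rwa [hget] at hx
      · -- mid < j : x ≤ a[mid] ≤ a[j]
        have : a[(lo + hi) / 2] ≤ a[j] := hmono ((lo + hi) / 2) j hmlt hj (by omega)
        rw [hget] at hx; omega
  · simp only [dif_neg h]
    have hle : lo = hi := by omega
    subst hle
    symm
    apply countP_eq_of_index _ _ lo (by omega)
    intro j hj
    by_cases hjlo : j < lo
    · simp [h1 j hj hjlo, hjlo]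
    · simp only [decide_eq_decide]
      constructor
      · intro hlt; exact absurd hlt (h2 j hj (by omega))
      · omega
termination_by hi - lo
decreasing_by all_goals omega

lemma countLess_eq (l : List Int) (x : Int) :
    (countLess (PySem.List.sorted l (fun v => v)) x : Nat) = l.countP (fun r => decide (r < x)) := by
  set s := PySem.List.sorted l (fun v => v) with hsdef
  have hperm : s.Perm l := PySem.List.sorted_perm l (fun v => v) false
  have hpw : s.Pairwise (· ≤ ·) := PySem.List.sorted_pairwise l (fun v => v)
  rw [← hperm.countP_eq]
  exact countLessGo_spec s x 0 s.length hpw (le_refl _) (by omega)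
    (by intro j hj hjlt; omega) (by intro j hj hjge; omega)

-- ===== VERDICT =====
theorem recalculate_galaxies_coordinates_spec : Claim_equal_recalculate_galaxies_coordinates := by
  intro galaxies empty_rows empty_cols factor hd
  clear hd
  unfold Spec_recalculate_galaxies_coordinates
  unfold recalculate_galaxies_coordinates recalculate_galaxies_coordinates_alt
  simp only []
  induction galaxies using List.reverseRecOn with
  | nil => rfl
  | append_singleton gs g ih =>
    rw [List.foldl_append, List.foldl_append, ih]
    simp only [List.foldl_cons, List.foldl_nil]
    congr 2
    rw [countLess_eq empty_rows g.1, countLess_eq empty_cols g.2]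
    simp only [Prod.ext_iff]
    constructor <;> ring
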